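-- pv_equiv track=rewrite | github.com/kalkidan-hub/Competitive-Programming | taskSchedule.py | leastTask
-- ===== SOURCE A (Python) =====
-- def leastTask(lst,n):
--     ct=0
--     lst.sort()
--     for i in range(len(lst)-1):
--         if lst[i] == lst[i+1] and n != 0:
--             ct += n
--         else: ct += 1
--     return ct
-- ===== SOURCE B (Python) =====
-- def leastTask(lst, n):
--     # Closed form from the distinct-value count instead of sorting and scanning adjacent pairs.
--     # (A sorts lst in place; B does not mutate its argument — return value only.)
--     if not lst:
--         return 0
--     d = len(set(lst))
--     dup = len(lst) - d
--     return (d - 1) + dup * (n if n != 0 else 1)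
-- ===== Notes on version B (the rewrite author's own statement) =====
-- stated objective: alternative
-- what changed: Replaces the sort plus adjacent-pair scan by a closed form computed from the distinct-value count (len(set(lst))), since after sorting the number of equal adjacent pairs is len(lst) minus the number of distinct values.
import Mathlib
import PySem

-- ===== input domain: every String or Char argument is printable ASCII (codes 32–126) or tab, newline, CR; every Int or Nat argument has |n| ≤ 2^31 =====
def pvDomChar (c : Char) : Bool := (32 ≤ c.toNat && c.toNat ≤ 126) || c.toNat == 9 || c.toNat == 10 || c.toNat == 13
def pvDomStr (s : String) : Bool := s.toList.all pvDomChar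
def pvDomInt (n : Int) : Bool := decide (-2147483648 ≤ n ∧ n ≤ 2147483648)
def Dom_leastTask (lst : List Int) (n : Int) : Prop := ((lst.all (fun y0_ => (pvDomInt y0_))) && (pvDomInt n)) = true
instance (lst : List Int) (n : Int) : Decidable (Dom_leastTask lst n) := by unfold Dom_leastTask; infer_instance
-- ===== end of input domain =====

-- B replaces A's sort + adjacent-pair scan by a closed form from the distinct-value count (alternative algorithm, similar measured cost).
-- A sorts lst in place (a caller-visible mutation); B does not — the equivalence proved here is about the return value only.


-- ===== PORT A =====
def leastTask (lst : List Int) (n : Int) : Int :=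
  let s := PySem.List.sorted lst (fun x => x) false
  (PySem.List.pyRange 0 (PySem.List.len s - 1) 1).foldl
    (fun ct i =>
      if PySem.List.pyGetD s i 0 = PySem.List.pyGetD s (i + 1) 0 ∧ n ≠ 0 then ct + n
      else ct + 1) 0

-- ===== PORT B =====
def leastTask_alt (lst : List Int) (n : Int) : Int :=
  if lst = [] then 0
  else
    let d : Int := PySem.Set.len (PySem.Set.ofList lst)
    let dup : Int := PySem.List.len lst - d
    (d - 1) + dup * (if n ≠ 0 then n else 1)

-- ===== PRECONDITION & SPEC =====
def Spec_leastTask (lst : List Int) (n : Int) (out : Int) : Prop := out = leastTask_alt lst n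
instance (lst : List Int) (n : Int) (out : Int) : Decidable (Spec_leastTask lst n out) := by unfold Spec_leastTask; infer_instance

-- ===== CLAIM (what is proved, stated in full; the proofs are below) =====
def Claim_equal_leastTask : Prop := ∀ (lst : List Int) (n : Int), Dom_leastTask lst n → Spec_leastTask lst n (leastTask lst n)

-- ===== LEMMAS AND PROOFS =====

/-- Number of equal adjacent pairs. -/
def adjEq : List Int → Nat
  | a :: b :: t => (if a = b then 1 else 0) + adjEq (b :: t)
  | _ => 0

lemma ofList_length_eq_card (xs : List Int) :
    (PySem.Set.ofList xs).length = xs.toFinset.card := by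
  have h1 : (PySem.Set.ofList xs).toFinset = xs.toFinset := by
    ext y; simp [List.mem_toFinset, PySem.Set.mem_ofList]
  rw [← h1, List.toFinset_card_of_nodup (PySem.Set.nodup_ofList xs)]

lemma adjEq_sorted (s : List Int) (hs : s.Pairwise (· ≤ ·)) (hne : s ≠ []) :
    adjEq s + s.toFinset.card = s.length := by
  induction s with
  | nil => simp at hne
  | cons a t ih =>
    cases t with
    | nil => simp [adjEq]
    | cons b t' =>
      have hpt : (b :: t').Pairwise (· ≤ ·) := hs.of_cons
      have hab : a ≤ b := (List.pairwise_cons.mp hs).1 b (by simp)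
      by_cases hEq : a = b
      · have hcard : (a :: b :: t').toFinset = (b :: t').toFinset := by
          subst hEq; simp [List.toFinset_cons]
        have := ih hpt (by simp)
        simp only [adjEq, if_pos hEq, hcard, List.length_cons] at *
        omega
      · have hnot : a ∉ (b :: t') := by
          intro hmem
          cases List.mem_cons.mp hmem with
          | inl h => exact hEq h
          | inr h =>
            have hb : b ≤ a := (List.pairwise_cons.mp hpt).1 a h
            exact hEq (le_antisymm hab hb)
        have hcard : (a :: b :: t').toFinset.card = (b :: t').toFinset.card + 1 := by
          rw [List.toFinset_cons, Finset.card_insert_of_notMem (by simpa using hnot)]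
        have := ih hpt (by simp)
        simp only [adjEq, if_neg hEq, List.length_cons] at *
        omega

lemma sum_range_getD (a : Int) (t : List Int) (m : Int) :
    ((List.range t.length).map
      (fun k => if (a :: t).getD k 0 = (a :: t).getD (k + 1) 0 then m else 1)).sum
    = (adjEq (a :: t) : Int) * m + ((t.length : Int) - (adjEq (a :: t) : Int)) := by
  induction t generalizing a with
  | nil => simp [adjEq]
  | cons b t' ih =>
    simp only [List.length_cons]
    rw [List.range_succ_eq_map]
    simp only [List.map_cons, List.map_map, List.sum_cons]
    have htail : ((List.range t'.length).map
        ((fun k => if (a :: b :: t').getD k 0 = (a :: b :: t').getD (k + 1) 0 then m else 1) ∘ Nat.succ)).sum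
        = ((List.range t'.length).map
        (fun k => if (b :: t').getD k 0 = (b :: t').getD (k + 1) 0 then m else 1)).sum := by
      apply congrArg
      apply List.map_congr_left
      intro k _
      simp [Function.comp]
    rw [htail, ih b]
    simp only [adjEq, List.getD_cons_zero, List.getD_cons_succ]
    split_ifs with h
    · push_cast; ring
    · push_cast; ring

theorem leastTask_spec_aux (lst : List Int) (n : Int) :
    leastTask lst n = leastTask_alt lst n := by
  by_cases hnil : lst = []
  · subst hnil
    simp [leastTask, leastTask_alt, PySem.List.sorted, PySem.List.len]
  · set s := PySem.List.sorted lst (fun x => x) false with hsdef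
    have hperm : s.Perm lst := PySem.List.sorted_perm lst (fun x => x) false
    have hsne : s ≠ [] := by
      intro h
      exact hnil (List.Perm.nil_eq (h ▸ hperm)).symm
    obtain ⟨a, t, hs⟩ := List.exists_cons_of_ne_nil hsne
    set m : Int := if n ≠ 0 then n else 1 with hm
    -- LHS to a sum over List.range
    have hL1 : leastTask lst n =
        ((List.range (s.length - 1)).map
          (fun k => if s.getD k 0 = s.getD (k + 1) 0 then m else 1)).sum := by
      rw [leastTask]
      rw [show PySem.List.len s - 1 = ((s.length : Int) - 1) from by simp [PySem.List.len]]
      rw [PySem.List.pyRange_one 0 ((s.length : Int) - 1)]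
      rw [List.foldl_map]
      have hcong : ∀ (ct : Int) (k : Nat), k ∈ List.range ((((s.length : Int) - 1) - 0).toNat) →
          (if PySem.List.pyGetD s (0 + (k : Int)) 0 = PySem.List.pyGetD s ((0 + (k : Int)) + 1) 0 ∧ n ≠ 0
            then ct + n else ct + 1)
          = ct + (if s.getD k 0 = s.getD (k + 1) 0 then m else 1) := by
        intro ct k _
        have h1 : (0 : Int) + (k : Int) = ((k : Nat) : Int) := by ring
        have h2 : (0 : Int) + (k : Int) + 1 = ((k + 1 : Nat) : Int) := by push_cast; ring
        rw [h2, h1, PySem.List.pyGetD_natCast, PySem.List.pyGetD_natCast]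
        by_cases hn : n = 0
        · simp [hm, hn]
        · rw [hm, if_pos hn]
          by_cases he : s.getD k 0 = s.getD (k + 1) 0
          · rw [if_pos ⟨he, hn⟩, if_pos he]
          · rw [if_neg (by tauto), if_neg he]
      rw [show PySem.List.sorted lst (fun x => x) false = s from rfl]
      rw [PySem.List.foldl_congr_mem _ _ _ _ hcong]
      rw [PySem.List.foldl_add]
      simp
    rw [hL1, hs]
    simp only [List.length_cons, Nat.add_sub_cancel]
    rw [sum_range_getD a t m]
    -- RHS
    rw [leastTask_alt, if_neg hnil]
    have hdcard : (PySem.Set.ofList lst).length = s.toFinset.card := by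
      rw [ofList_length_eq_card]
      congr 1
      exact Finset.ext fun y => by simp [List.mem_toFinset, hperm.mem_iff]
    have hlen : lst.length = s.length := (List.Perm.length_eq hperm).symm
    have hsorted : s.Pairwise (· ≤ ·) := PySem.List.sorted_pairwise lst (fun x => x)
    have hkey : adjEq s + s.toFinset.card = s.length := adjEq_sorted s hsorted hsne
    have hE : (adjEq (a :: t) : Int) = ((s.length : Int)) - (s.toFinset.card : Int) := by
      rw [hs] at hkey; push_cast [← hkey, hs]; ring
    have hT : ((t.length : Int)) = (s.length : Int) - 1 := by rw [hs]; push_cast [List.length_cons]; ring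
    simp only [PySem.Set.len, PySem.List.len, hdcard, hlen, hE, hT]
    ring

-- ===== VERDICT (by name: the statement is the Claim_ definition above) =====
theorem leastTask_spec : Claim_equal_leastTask := by
  intro lst n _
  exact leastTask_spec_aux lst n
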